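-- pv_equiv track=rewrite | github.com/superboysb-12/AgentCompetitionAnalysisPlatform | KnowledgeFusion/brand_inference.py | extract_representative_entities
-- ===== SOURCE A (Python) =====
-- from typing import Dict, List, Optional, Tuple
--
-- def extract_representative_entities(
--     entities_with_brand: List[Dict],
--     max_per_brand: int = 3
-- ) -> Dict[str, List[Dict]]:
--     """
--     提取每个品牌的代表性实体（作为LLM上下文）
--
--     Args:
--         entities_with_brand: 有品牌的实体列表
--         max_per_brand: 每个品牌最多提取几个代表性实体
--
--     Returns:
--         {brand_name: [代表性实体列表]}
--     """
--     from collections import defaultdict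
--
--     brand_entities = defaultdict(list)
--
--     # 按品牌分组
--     for entity in entities_with_brand:
--         brand = entity.get('brand', '')
--         if brand:
--             brand_entities[brand].append(entity)
--
--     # 为每个品牌选择代表性实体
--     representative = {}
--     for brand, entities in brand_entities.items():
--         # 优先选择信息完整的实体（有manufacturer、product_model等）
--         scored_entities = []
--         for entity in entities:
--             score = 0
--             if entity.get('manufacturer'):
--                 score += 2
--             if entity.get('product_model'):
--                 score += 2
--             if entity.get('category'):
--                 score += 1
--             if entity.get('series'):
--                 score += 1
--             scored_entities.append((score, entity))
--
--         # 按分数排序，取前N个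
--         scored_entities.sort(key=lambda x: x[0], reverse=True)
--         representative[brand] = [e for _, e in scored_entities[:max_per_brand]]
--
--     return representative
-- ===== SOURCE B (Python) =====
-- from typing import Dict, List
--
-- def extract_representative_entities(
--     entities_with_brand: List[Dict],
--     max_per_brand: int = 3
-- ) -> Dict[str, List[Dict]]:
--     # One pass: bucket each entity by (brand, score); scores are bounded 0..6,
--     # so reading buckets 6..0 replaces the per-brand sort (counting sort).
--     buckets = {}  # brand -> list of 7 buckets indexed by score
--     for entity in entities_with_brand:
--         brand = entity.get('brand', '')
--         if not brand:
--             continue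
--         score = (2 * bool(entity.get('manufacturer'))
--                  + 2 * bool(entity.get('product_model'))
--                  + bool(entity.get('category'))
--                  + bool(entity.get('series')))
--         if brand not in buckets:
--             buckets[brand] = [[] for _ in range(7)]
--         buckets[brand][score].append(entity)
--     return {
--         brand: [e for s in range(6, -1, -1) for e in bks[s]][:max_per_brand]
--         for brand, bks in buckets.items()
--     }
-- ===== Notes on version B (the rewrite author's own statement) =====
-- stated objective: alternative
-- what changed: Replaces A's group-then-score-then-sort pipeline with a single pass that drops each entity into one of 7 per-brand counting-sort buckets (scores are bounded 0..6) read back in descending score order, removing the per-brand comparison sort.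
import Mathlib
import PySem

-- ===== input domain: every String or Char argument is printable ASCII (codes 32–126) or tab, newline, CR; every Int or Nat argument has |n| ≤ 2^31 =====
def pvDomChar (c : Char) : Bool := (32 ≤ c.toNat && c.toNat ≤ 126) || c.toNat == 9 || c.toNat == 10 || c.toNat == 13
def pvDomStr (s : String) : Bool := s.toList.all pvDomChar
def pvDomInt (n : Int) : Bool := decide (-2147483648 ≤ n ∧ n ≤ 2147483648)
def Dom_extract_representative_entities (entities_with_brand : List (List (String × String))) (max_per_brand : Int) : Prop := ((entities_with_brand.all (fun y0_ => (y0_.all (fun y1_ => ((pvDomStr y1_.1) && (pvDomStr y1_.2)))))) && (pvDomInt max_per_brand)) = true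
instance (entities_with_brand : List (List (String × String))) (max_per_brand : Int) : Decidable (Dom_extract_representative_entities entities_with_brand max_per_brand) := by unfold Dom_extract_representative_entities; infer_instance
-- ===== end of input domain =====

-- B replaces A's per-brand score-and-sort passes with 7 counting-sort buckets (scores are bounded
-- 0..6) filled during the single grouping pass; the return value is proved identical (same cost in practice).

-- ===== PORT A =====

-- truthiness of entity.get(k): a present, non-empty string
def pvTruthy (o : Option String) : Bool :=
  match o with
  | some s => s != ""
  | none => false

-- entity.get('brand', '')
def pvBrand (e : List (String × String)) : String :=
  (PySem.Dict.mk e).getD "brand" ""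

-- A's score accumulation: score = 0; score += 2 / += 2 / += 1 / += 1
def pvScoreA (e : List (String × String)) : Int :=
  let s : Int := 0
  let s := if pvTruthy ((PySem.Dict.mk e).get? "manufacturer") then s + 2 else s
  let s := if pvTruthy ((PySem.Dict.mk e).get? "product_model") then s + 2 else s
  let s := if pvTruthy ((PySem.Dict.mk e).get? "category") then s + 1 else s
  let s := if pvTruthy ((PySem.Dict.mk e).get? "series") then s + 1 else s
  s

def extract_representative_entities (entities_with_brand : List (List (String × String))) (max_per_brand : Int) : List (String × List (List (String × String))) :=
  -- brand_entities = defaultdict(list); for entity: if brand: brand_entities[brand].append(entity)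
  let brand_entities := entities_with_brand.foldl
    (fun d e => if pvBrand e != "" then d.modify (pvBrand e) [] (fun l => l ++ [e]) else d)
    (PySem.Dict.mk ([] : List (String × List (List (String × String)))))
  -- representative = {}; for brand, entities in brand_entities.items(): score, sort desc, take [:max_per_brand]
  let representative := brand_entities.items.foldl
    (fun r p =>
      let scored := p.2.foldl (fun acc e => acc ++ [(pvScoreA e, e)]) ([] : List (Int × List (String × String)))
      let sortedScored := PySem.List.sorted scored (fun q => q.1) true
      r.insert p.1 ((PySem.List.slice sortedScored none (some max_per_brand)).map (fun q => q.2)))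
    (PySem.Dict.mk [])
  representative.items

-- ===== PORT B =====

-- B's score: 2*bool(...) + 2*bool(...) + bool(...) + bool(...)  (a Python int 0..6; Nat here)
def pvScoreB (e : List (String × String)) : Nat :=
  2 * (if pvTruthy ((PySem.Dict.mk e).get? "manufacturer") then 1 else 0)
  + 2 * (if pvTruthy ((PySem.Dict.mk e).get? "product_model") then 1 else 0)
  + (if pvTruthy ((PySem.Dict.mk e).get? "category") then 1 else 0)
  + (if pvTruthy ((PySem.Dict.mk e).get? "series") then 1 else 0)

-- [[] for _ in range(7)]
def pvInit7 : List (List (List (String × String))) := List.replicate 7 []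

-- buckets[brand][score].append(entity); the index pvScoreB e < 7 is always in range (getD is exact there)
def pvBucketAdd (bk : List (List (List (String × String)))) (e : List (String × String)) : List (List (List (String × String))) :=
  bk.set (pvScoreB e) (bk.getD (pvScoreB e) [] ++ [e])

def extract_representative_entities_alt (entities_with_brand : List (List (String × String))) (max_per_brand : Int) : List (String × List (List (String × String))) :=
  -- one pass: initialise-on-miss then append into the score bucket
  let buckets := entities_with_brand.foldl
    (fun d e => if pvBrand e != "" then d.insert (pvBrand e) (pvBucketAdd (d.getD (pvBrand e) pvInit7) e) else d)
    (PySem.Dict.mk ([] : List (String × List (List (List (String × String))))))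
  -- {brand: [e for s in range(6,-1,-1) for e in bks[s]][:max_per_brand] for brand, bks in buckets.items()}
  (buckets.items.foldl
    (fun r p =>
      r.insert p.1 (PySem.List.slice ((PySem.List.pyRange 6 (-1) (-1)).flatMap (fun s => p.2.getD s.toNat [])) none (some max_per_brand)))
    (PySem.Dict.mk [])).items

-- ===== PRECONDITION & SPEC =====
def Spec_extract_representative_entities (entities_with_brand : List (List (String × String))) (max_per_brand : Int) (out : List (String × List (List (String × String)))) : Prop := out = extract_representative_entities_alt entities_with_brand max_per_brand
instance (entities_with_brand : List (List (String × String))) (max_per_brand : Int) (out : List (String × List (List (String × String)))) : Decidable (Spec_extract_representative_entities entities_with_brand max_per_brand out) := by unfold Spec_extract_representative_entities; infer_instance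

-- ===== CLAIM (what is proved, stated in full; the proofs are below) =====
def Claim_equal_extract_representative_entities : Prop := ∀ (entities_with_brand : List (List (String × String))) (max_per_brand : Int), Dom_extract_representative_entities entities_with_brand max_per_brand → Spec_extract_representative_entities entities_with_brand max_per_brand (extract_representative_entities entities_with_brand max_per_brand)

-- ===== LEMMAS AND PROOFS =====

theorem pvScoreA_eq_cast (e : List (String × String)) : pvScoreA e = (pvScoreB e : Int) := by
  unfold pvScoreA pvScoreB
  split_ifs <;> simp

theorem pvScoreB_lt (e : List (String × String)) : pvScoreB e < 7 := by
  unfold pvScoreB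
  split_ifs <;> simp

theorem insertBy_append_false {α : Type} (before : α → α → Bool) (x : α) (A B : List α)
    (h : ∀ a ∈ A, before x a = false) :
    PySem.List.insertBy before x (A ++ B) = A ++ PySem.List.insertBy before x B := by
  induction A with
  | nil => simp
  | cons a A ih =>
    have ha : before x a = false := h a (by simp)
    simp only [List.cons_append, PySem.List.insertBy, ha, Bool.false_eq_true, if_false]
    simp [ih (fun a ha => h a (by simp [ha]))]

theorem insertBy_cons_of_all {α : Type} (before : α → α → Bool) (x : α) (L : List α)
    (h : ∀ a ∈ L, before x a = true) :
    PySem.List.insertBy before x L = x :: L := by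
  cases L with
  | nil => rfl
  | cons b L => simp [PySem.List.insertBy, h b (by simp)]

theorem insertBy_buckets {α : Type} (key : α → Int) (ks : List Int) (x : α) (ys : List α)
    (hks : ks.Pairwise (fun a b => b < a)) (hx : key x ∈ ks) :
    PySem.List.insertBy (fun a b => decide (key b < key a)) x
      (ks.flatMap (fun k => ys.filter (fun y => key y == k)))
    = ks.flatMap (fun k => (ys ++ [x]).filter (fun y => key y == k)) := by
  induction ks with
  | nil => cases hx
  | cons k ks ih =>
    rw [List.pairwise_cons] at hks
    simp only [List.flatMap_cons, List.filter_append]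
    by_cases hkx : key x = k
    · rw [insertBy_append_false _ _ _ _ (by
        intro a ha
        have := (List.mem_filter.mp ha).2
        simp only [beq_iff_eq] at this
        simp [this, hkx])]
      rw [insertBy_cons_of_all _ _ _ (by
        intro a ha
        simp only [List.mem_flatMap, List.mem_filter, beq_iff_eq] at ha
        obtain ⟨k', hk', _, hkey⟩ := ha
        simp [hkey, hkx, hks.1 k' hk'])]
      have htail : ks.flatMap (fun k' => ys.filter (fun y => key y == k') ++ List.filter (fun y => key y == k') [x])
          = ks.flatMap (fun k' => ys.filter (fun y => key y == k')) := by
        apply List.flatMap_congr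
        intro k' hk'
        have hlt : k' < k := hks.1 k' hk'
        have hne : (key x == k') = false := by
          simp only [beq_eq_false_iff_ne, ne_eq, hkx]; omega
        simp [hne]
      have hhead : (List.filter (fun y => key y == k) [x]) = [x] := by
        simp [hkx]
      rw [htail, hhead]
      simp
    · have hxks : key x ∈ ks := by
        rcases List.mem_cons.mp hx with h | h
        · exact absurd h hkx
        · exact h
      have hxlt : key x < k := hks.1 _ hxks
      rw [insertBy_append_false _ _ _ _ (by
        intro a ha
        have hk : key a = k := by
          have := (List.mem_filter.mp ha).2
          simpa using this
        simp only [decide_eq_false_iff_not, not_lt, hk]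
        omega)]
      rw [ih hks.2 hxks]
      have hhead : (List.filter (fun y => key y == k) [x]) = [] := by
        simp [hkx]
      simp [hhead, List.filter_append]

theorem sorted_rev_eq_buckets {α : Type} (key : α → Int) (ks : List Int) (xs : List α)
    (hks : ks.Pairwise (fun a b => b < a)) (hall : ∀ x ∈ xs, key x ∈ ks) :
    PySem.List.sorted xs key true = ks.flatMap (fun k => xs.filter (fun x => key x == k)) := by
  induction xs using List.reverseRecOn with
  | nil => simp [PySem.List.sorted]
  | append_singleton ys x ih =>
    rw [PySem.List.sorted_rev_eq_foldl_insertBy, List.foldl_append]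
    simp only [List.foldl_cons, List.foldl_nil]
    rw [← PySem.List.sorted_rev_eq_foldl_insertBy]
    rw [ih (fun y hy => hall y (by simp [hy]))]
    exact insertBy_buckets key ks x ys hks (hall x (by simp))

theorem slice_map {α β : Type} (f : α → β) (l : List α) (a b : Option Int) :
    (PySem.List.slice l a b).map f = PySem.List.slice (l.map f) a b := by
  simp [PySem.List.slice, List.map_take, List.map_drop]

theorem cast_mem_ks (n : Nat) (h : n < 7) : ((n : Int) ∈ ([6, 5, 4, 3, 2, 1, 0] : List Int)) := by
  simp only [List.mem_cons, List.not_mem_nil, or_false]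
  omega

theorem filter_scoreAB (es : List (List (String × String))) (n : Nat) :
    es.filter (fun e => pvScoreA e == (n : Int)) = es.filter (fun e => pvScoreB e == n) := by
  apply List.filter_congr
  intro e _
  simp [pvScoreA_eq_cast]

theorem bgroup (l : List (List (String × String))) (d : PySem.Dict String (List (List (List (String × String))))) (b : String) :
    (l.foldl (fun d e => d.insert (pvBrand e) (pvBucketAdd (d.getD (pvBrand e) pvInit7) e)) d).getD b pvInit7
    = (l.filter (fun e => pvBrand e == b)).foldl pvBucketAdd (d.getD b pvInit7) := by
  induction l generalizing d with
  | nil => simp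
  | cons e l ih =>
    simp only [List.foldl_cons, List.filter_cons]
    by_cases hb : pvBrand e = b
    · simp only [hb, beq_self_eq_true, if_true, List.foldl_cons]
      rw [ih]
      rw [PySem.Dict.getD_insert]
      simp
    · have : (pvBrand e == b) = false := by simp [hb]
      simp only [this, Bool.false_eq_true, if_false]
      rw [ih, PySem.Dict.getD_insert]
      simp [Ne.symm hb]

theorem bucket_getD (es : List (List (String × String))) (bk : List (List (List (String × String)))) (s : Nat)
    (hlen : bk.length = 7) (hs : s < 7) :
    (es.foldl pvBucketAdd bk).getD s [] = bk.getD s [] ++ es.filter (fun e => pvScoreB e == s) := by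
  induction es generalizing bk with
  | nil => simp
  | cons e es ih =>
    simp only [List.foldl_cons, List.filter_cons]
    rw [ih _ (by simp [pvBucketAdd, hlen])]
    have hscore := pvScoreB_lt e
    by_cases hse : pvScoreB e = s
    · have : (pvScoreB e == s) = true := by simp [hse]
      simp only [this, if_true]
      have : (pvBucketAdd bk e).getD s [] = bk.getD s [] ++ [e] := by
        simp only [pvBucketAdd, hse, List.getD_eq_getElem?_getD, List.getElem?_set_self
          (by omega : s < bk.length)]
        simp
      rw [this, List.append_assoc]
      simp
    · have : (pvScoreB e == s) = false := by simp [hse]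
      simp only [this, Bool.false_eq_true, if_false]
      have : (pvBucketAdd bk e).getD s [] = bk.getD s [] := by
        simp only [pvBucketAdd, List.getD_eq_getElem?_getD]
        rw [List.getElem?_set_ne (by omega : pvScoreB e ≠ s)]
      rw [this]

theorem perBrand (es : List (List (String × String))) (mpb : Int) :
    (PySem.List.slice (PySem.List.sorted (es.map (fun e => (pvScoreA e, e))) (fun q => q.1) true) none (some mpb)).map (fun q => q.2)
    = PySem.List.slice ((PySem.List.pyRange 6 (-1) (-1)).flatMap (fun s => (es.foldl pvBucketAdd pvInit7).getD s.toNat [])) none (some mpb) := by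
  rw [slice_map]
  congr 1
  rw [sorted_rev_eq_buckets (fun q : Int × List (String × String) => q.1) ([6, 5, 4, 3, 2, 1, 0] : List Int) _
    (by decide)
    (by
      intro q hq
      simp only [List.mem_map] at hq
      obtain ⟨e, _, rfl⟩ := hq
      rw [pvScoreA_eq_cast]
      exact cast_mem_ks _ (pvScoreB_lt e))]
  have hrange : PySem.List.pyRange 6 (-1) (-1) = ([6, 5, 4, 3, 2, 1, 0] : List Int) := by decide
  rw [hrange]
  simp only [List.flatMap_cons, List.flatMap_nil, List.map_append, List.append_nil]
  have hbk : ∀ k : Nat, k < 7 →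
      (List.map (fun q => q.2) ((es.map (fun e => (pvScoreA e, e))).filter (fun q => q.1 == (k : Int))))
      = (es.foldl pvBucketAdd pvInit7).getD k [] := by
    intro k hk
    rw [List.filter_map, List.map_map]
    have h1 : ((fun q : Int × List (String × String) => q.1 == (k : Int)) ∘ (fun e => (pvScoreA e, e)))
        = fun e => pvScoreA e == (k : Int) := rfl
    have h2 : ((fun q : Int × List (String × String) => q.2) ∘ (fun e => (pvScoreA e, e)))
        = id := rfl
    rw [h1, h2, List.map_id, filter_scoreAB]
    rw [bucket_getD es pvInit7 k (by rfl) hk]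
    have hinit : pvInit7[k]?.getD ([] : List (List (String × String))) = [] := by
      unfold pvInit7
      rw [List.getElem?_replicate]
      simp [hk]
    simp only [List.getD_eq_getElem?_getD, hinit, List.nil_append]
  have c6 := hbk 6 (by omega); have c5 := hbk 5 (by omega); have c4 := hbk 4 (by omega)
  have c3 := hbk 3 (by omega); have c2 := hbk 2 (by omega); have c1 := hbk 1 (by omega)
  have c0 := hbk 0 (by omega)
  norm_num at c6 c5 c4 c3 c2 c1 c0 ⊢
  simp only [show Int.toNat 6 = 6 from rfl, show Int.toNat 5 = 5 from rfl,
    show Int.toNat 4 = 4 from rfl, show Int.toNat 3 = 3 from rfl, show Int.toNat 2 = 2 from rfl]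
  rw [c6, c5, c4, c3, c2, c1, c0]

-- ===== VERDICT (by name: the statement is the Claim_ definition above) =====
theorem dictA_getD (fents : List (List (String × String))) (b : String) :
    (fents.foldl (fun d e => d.modify (pvBrand e) [] (fun l => l ++ [e]))
      (PySem.Dict.mk ([] : List (String × List (List (String × String)))))).getD b []
    = fents.filter (fun e => pvBrand e == b) := by
  have hm : fents.foldl (fun d e => d.modify (pvBrand e) [] (fun l => l ++ [e]))
      (PySem.Dict.mk ([] : List (String × List (List (String × String)))))
      = (fents.map (fun e => (pvBrand e, e))).foldl (fun d p => d.modify p.1 [] (fun l => l ++ [p.2]))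
        (PySem.Dict.mk []) := by
    rw [List.foldl_map]
  rw [hm, PySem.Dict.getD_foldl_modify_append]
  rw [List.filter_map, List.map_map]
  have h2 : ((fun x : String × List (String × String) => x.2) ∘ (fun e => (pvBrand e, e))) = id := rfl
  have h1 : ((fun p : String × List (String × String) => p.1 == b) ∘ (fun e => (pvBrand e, e)))
      = fun e => pvBrand e == b := rfl
  rw [h1, h2, List.map_id]
  rfl

theorem extract_representative_entities_spec : Claim_equal_extract_representative_entities := by
  intro ents mpb _
  unfold Spec_extract_representative_entities extract_representative_entities extract_representative_entities_alt
  simp only []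
  have gA : List.foldl (fun d e => if (pvBrand e != "") = true then d.modify (pvBrand e) [] (fun l => l ++ [e]) else d)
      (PySem.Dict.mk ([] : List (String × List (List (String × String))))) ents
      = List.foldl (fun d e => d.modify (pvBrand e) [] (fun l => l ++ [e]))
        (PySem.Dict.mk []) (ents.filter (fun e => pvBrand e != "")) :=
    PySem.List.foldl_if_eq_foldl_filter _ _ _ _
  have gB : List.foldl (fun d e => if (pvBrand e != "") = true then d.insert (pvBrand e) (pvBucketAdd (d.getD (pvBrand e) pvInit7) e) else d)
      (PySem.Dict.mk ([] : List (String × List (List (List (String × String)))))) ents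
      = List.foldl (fun d e => d.insert (pvBrand e) (pvBucketAdd (d.getD (pvBrand e) pvInit7) e))
        (PySem.Dict.mk []) (ents.filter (fun e => pvBrand e != "")) :=
    PySem.List.foldl_if_eq_foldl_filter _ _ _ _
  rw [gA, gB]
  set fents := ents.filter (fun e => pvBrand e != "") with hfents
  set dA := fents.foldl (fun d e => d.modify (pvBrand e) [] (fun l => l ++ [e]))
    (PySem.Dict.mk ([] : List (String × List (List (String × String))))) with hdA
  set dB := fents.foldl (fun d e => d.insert (pvBrand e) (pvBucketAdd (d.getD (pvBrand e) pvInit7) e))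
    (PySem.Dict.mk ([] : List (String × List (List (List (String × String)))))) with hdB
  have hkA : dA.keys = PySem.Set.update [] (fents.map pvBrand) := by
    rw [hdA, PySem.Dict.keys_foldl_modify_key fents pvBrand [] (fun _ e => (fun l => l ++ [e]))]
    rfl
  have hkB : dB.keys = PySem.Set.update [] (fents.map pvBrand) := by
    rw [hdB, PySem.Dict.keys_foldl_insert_key fents pvBrand
      (fun d e => pvBucketAdd (d.getD (pvBrand e) pvInit7) e)]
    rfl
  have hnA : dA.keys.Nodup := by
    rw [hdA]
    exact PySem.Dict.nodup_keys_foldl_modify_key fents pvBrand [] _ _ (by simp [PySem.Dict.keys])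
  have hnB : dB.keys.Nodup := by
    rw [hdB]
    exact PySem.Dict.nodup_keys_foldl_insert_key fents pvBrand _ _ (by simp [PySem.Dict.keys])
  rw [PySem.Dict.items_foldl_insert_fresh dA.items Prod.fst _ (PySem.Dict.mk [])
      (fun a _ => rfl) (by simpa [PySem.Dict.keys] using hnA)]
  rw [PySem.Dict.items_foldl_insert_fresh dB.items Prod.fst _ (PySem.Dict.mk [])
      (fun a _ => rfl) (by simpa [PySem.Dict.keys] using hnB)]
  rw [PySem.Dict.items_eq_map_keys dA hnA [], PySem.Dict.items_eq_map_keys dB hnB pvInit7]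
  rw [hkA, hkB, List.map_map, List.map_map]
  show [] ++ _ = [] ++ _
  rw [List.nil_append, List.nil_append]
  apply List.map_congr_left
  intro b _
  simp only [Function.comp_apply]
  congr 1
  rw [dictA_getD fents b]
  rw [bgroup fents (PySem.Dict.mk []) b]
  have hd0 : (PySem.Dict.mk ([] : List (String × List (List (List (String × String)))))).getD b pvInit7 = pvInit7 := rfl
  rw [hd0]
  rw [PySem.List.foldl_append_singleton_eq_map (fun e => (pvScoreA e, e))
    (fents.filter (fun e => pvBrand e == b)) []]
  rw [List.nil_append]
  exact perBrand (fents.filter (fun e => pvBrand e == b)) mpb
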